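-- pv_equiv track=rewrite | github.com/wodus1035/2025_GTra | src/gutils.py | cal_connection
-- ===== SOURCE A (Python) =====
-- def cal_connection(js_list):
--     # Calculate # of cell to cell connection
--     ctc = {}
--     for i in range(len(js_list)):
--         if ctc.get(tuple([js_list[i][0],js_list[i][2]])) is None:
--             ctc[tuple([js_list[i][0], js_list[i][2]])] = 1
--         else:
--             ctc[tuple([js_list[i][0], js_list[i][2]])] += 1
--     ctc_n = len(ctc)
--
--     # Calculate # of gene to gene connection
--     gtg_n = 0
--     for k,v in ctc.items():
--         gtg_n += v
--
--     return ctc_n, gtg_n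
-- ===== SOURCE B (Python) =====
-- def cal_connection(js_list):
--     # Sort-then-scan: sort the (source, target) pairs, then count boundaries
--     # between adjacent equal runs to get the number of distinct pairs.  Each
--     # entry contributes exactly one connection, so the total is len(js_list).
--     keys = sorted((x[0], x[2]) for x in js_list)
--     ctc_n = 0
--     prev = None
--     for k in keys:
--         if k != prev:
--             ctc_n += 1
--         prev = k
--     return ctc_n, len(js_list)
-- ===== Notes on version B (the rewrite author's own statement) =====
-- stated objective: alternative
-- what changed: B replaces A's count dictionary and value-summing loop by sort-then-scan: it sorts the (x[0], x[2]) pairs and counts run boundaries in one adjacent scan to get the distinct-pair count, and returns len(js_list) as the total since each entry adds exactly 1 to exactly one count.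
import Mathlib
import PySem

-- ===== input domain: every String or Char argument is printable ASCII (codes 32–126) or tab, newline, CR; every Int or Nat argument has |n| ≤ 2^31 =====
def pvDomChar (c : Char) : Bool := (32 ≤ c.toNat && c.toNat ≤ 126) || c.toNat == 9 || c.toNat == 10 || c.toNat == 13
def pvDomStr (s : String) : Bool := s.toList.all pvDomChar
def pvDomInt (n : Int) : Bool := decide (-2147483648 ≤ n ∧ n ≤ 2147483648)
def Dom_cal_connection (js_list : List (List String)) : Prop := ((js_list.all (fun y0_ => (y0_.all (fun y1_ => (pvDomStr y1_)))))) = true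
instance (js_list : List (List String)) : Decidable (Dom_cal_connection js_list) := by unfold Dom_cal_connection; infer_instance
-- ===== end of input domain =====

-- B replaces A's count dictionary and value-summing loop by sort-then-scan:
-- sort the (row[0], row[2]) pairs, count run boundaries in one adjacent scan,
-- and return len(js_list) as the total (objective: alternative).

-- (row[0], row[2]) — the cell pair named by one entry (defaults unreachable under Pre_)
def pvKey (row : List String) : String × String :=
  (PySem.List.pyGetD row 0 "", PySem.List.pyGetD row 2 "")

-- Python's tuple-of-strings '<' as a sort key: lexicographic on the pair, strings
-- compared code-point-wise (PySem: Python str '<' IS Lean '<' on s.toList)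
def pvLexKey (p : String × String) : Lex (List Char × List Char) :=
  toLex (p.1.toList, p.2.toList)

-- ===== PORT A =====
def cal_connection (js_list : List (List String)) : Int × Int :=
  let ctc : PySem.Dict (String × String) Int :=
    (PySem.List.pyRange 0 (PySem.List.len js_list)).foldl
      (fun ctc i =>
        let row := PySem.List.pyGetD js_list i []
        match ctc.get? (pvKey row) with
        | none => ctc.insert (pvKey row) 1
        | some v => ctc.insert (pvKey row) (v + 1))
      PySem.Dict.empty
  let ctc_n : Int := (ctc.size : Int)
  let gtg_n : Int := ctc.items.foldl (fun g kv => g + kv.2) 0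
  (ctc_n, gtg_n)

-- ===== PORT B =====
def cal_connection_alt (js_list : List (List String)) : Int × Int :=
  let keys := PySem.List.sorted (js_list.map pvKey) pvLexKey false
  let scan := keys.foldl
    (fun (st : Int × Option (String × String)) k =>
      (if some k ≠ st.2 then st.1 + 1 else st.1, some k))
    (0, none)
  (scan.1, (PySem.List.len js_list : Int))

-- ===== PRECONDITION & SPEC =====
-- Pre_ excludes exactly the inputs on which the Python raises IndexError: a row
-- shorter than 3 elements, where js_list[i][2] (or [0]) is out of range (B's
-- x[0]/x[2] raise there too).
def Pre_cal_connection (js_list : List (List String)) : Prop :=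
  ∀ row ∈ js_list, 3 ≤ row.length
instance (js_list : List (List String)) : Decidable (Pre_cal_connection js_list) := by
  unfold Pre_cal_connection; infer_instance
def pvWitness_cal_connection : List (List String) := [["a", "x", "b"], ["a", "y", "b"]]

def Spec_cal_connection (js_list : List (List String)) (out : Int × Int) : Prop := out = cal_connection_alt js_list
instance (js_list : List (List String)) (out : Int × Int) : Decidable (Spec_cal_connection js_list out) := by unfold Spec_cal_connection; infer_instance

-- ===== CLAIM (what is proved, stated in full; the proofs are below) =====
def Claim_equal_cal_connection : Prop := ∀ (js_list : List (List String)), Dom_cal_connection js_list → Pre_cal_connection js_list → Spec_cal_connection js_list (cal_connection js_list)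

-- ===== LEMMAS AND PROOFS =====

-- the boundary count of B's scan, as a recursive function of (prev, remaining)
def pvG {α : Type} [DecidableEq α] : Option α → List α → Int
  | _, [] => 0
  | prev, k :: t => (if some k ≠ prev then 1 else 0) + pvG (some k) t

theorem pvFoldl_eq_pvG {α : Type} [DecidableEq α] (l : List α) (c : Int) (prev : Option α) :
    (l.foldl (fun (st : Int × Option α) k =>
        (if some k ≠ st.2 then st.1 + 1 else st.1, some k)) (c, prev)).1
      = c + pvG prev l := by
  induction l generalizing c prev with
  | nil => simp [pvG]
  | cons k t ih =>
      simp only [List.foldl_cons, pvG, ih]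
      split_ifs <;> ring

theorem pvCard_insert_eq {α : Type} [DecidableEq α] (a : α) (s : Finset α) :
    ((insert a s).card : Int) = ((s.erase a).card : Int) + 1 := by
  by_cases h : a ∈ s
  · rw [Finset.insert_eq_self.mpr h]
    exact_mod_cast (Finset.card_erase_add_one h).symm
  · rw [Finset.erase_eq_of_notMem h, Finset.card_insert_of_notMem h]
    push_cast; ring

-- pvG over the tail of a sorted list, with prev = some k and k minimal
theorem pvG_some_sorted {α κ : Type} [DecidableEq α] [LinearOrder κ]
    (e : α → κ) (hinj : Function.Injective e) (k : α) (l : List α)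
    (hk : ∀ y ∈ l, e k ≤ e y) (hl : l.Pairwise (fun a b => e a ≤ e b)) :
    pvG (some k) l = ((l.toFinset.erase k).card : Int) := by
  induction l generalizing k with
  | nil => simp [pvG]
  | cons a t ih =>
      rw [List.pairwise_cons] at hl
      by_cases hak : a = k
      · subst hak
        have : pvG (some a) (a :: t) = pvG (some a) t := by simp [pvG]
        rw [this, ih a hl.1 hl.2, List.toFinset_cons, Finset.erase_insert_eq_erase]
      · have hka : e k < e a :=
          lt_of_le_of_ne (hk a (List.mem_cons_self)) (fun h => hak ((hinj h).symm))
        have hknt : k ∉ t := fun hm =>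
          absurd (hka.trans_le (hl.1 k hm)) (lt_irrefl _)
        have hkni : k ∉ insert a t.toFinset := by
          simp only [Finset.mem_insert, List.mem_toFinset]
          exact fun h => h.elim (fun h1 => hak h1.symm) hknt
        have hstep : pvG (some k) (a :: t) = 1 + pvG (some a) t := by
          simp [pvG, fun h => hak h]
        rw [hstep, ih a hl.1 hl.2, List.toFinset_cons,
            Finset.erase_eq_of_notMem hkni, pvCard_insert_eq]
        ring

theorem pvG_none_sorted {α κ : Type} [DecidableEq α] [LinearOrder κ]
    (e : α → κ) (hinj : Function.Injective e) (l : List α)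
    (hl : l.Pairwise (fun a b => e a ≤ e b)) :
    pvG none l = (l.toFinset.card : Int) := by
  cases l with
  | nil => simp [pvG]
  | cons k t =>
      rw [List.pairwise_cons] at hl
      have : pvG none (k :: t) = 1 + pvG (some k) t := by simp [pvG]
      rw [this, pvG_some_sorted e hinj k t hl.1 hl.2, List.toFinset_cons,
          pvCard_insert_eq]
      ring

theorem pvLexKey_inj : Function.Injective pvLexKey := by
  intro a b h
  unfold pvLexKey at h
  have h' := toLex.injective h
  have h1 : a.1.toList = b.1.toList := congrArg Prod.fst h'
  have h2 : a.2.toList = b.2.toList := congrArg Prod.snd h'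
  exact Prod.ext (String.toList_inj.mp h1) (String.toList_inj.mp h2)

-- B's first component counts the distinct keys
theorem pvAlt_fst (ks : List (String × String)) :
    ((PySem.List.sorted ks pvLexKey false).foldl
        (fun (st : Int × Option (String × String)) k =>
          (if some k ≠ st.2 then st.1 + 1 else st.1, some k)) (0, none)).1
      = (ks.toFinset.card : Int) := by
  rw [pvFoldl_eq_pvG, zero_add,
      pvG_none_sorted pvLexKey pvLexKey_inj _ (PySem.List.sorted_pairwise ks pvLexKey)]
  have h : (PySem.List.sorted ks pvLexKey false).toFinset = ks.toFinset := by
    ext x; simp [List.mem_toFinset, PySem.List.mem_sorted]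
  rw [h]

-- A's loop body is the counter step for the key pvKey row.
theorem pvStep_eq (ctc : PySem.Dict (String × String) Int) (k : String × String) :
    (match ctc.get? k with
     | none => ctc.insert k 1
     | some v => ctc.insert k (v + 1)) = ctc.insert k (ctc.getD k 0 + 1) := by
  cases h : ctc.get? k with
  | none => simp [PySem.Dict.getD_of_get?_eq_none ctc 0 h]
  | some v => simp [PySem.Dict.getD_of_get?_eq_some ctc 0 h]

-- A's dictionary is Counter(js_list mapped through pvKey).
theorem pvCtc_eq (js_list : List (List String)) :
    (PySem.List.pyRange 0 (PySem.List.len js_list)).foldl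
      (fun (ctc : PySem.Dict (String × String) Int) i =>
        let row := PySem.List.pyGetD js_list i []
        match ctc.get? (pvKey row) with
        | none => ctc.insert (pvKey row) 1
        | some v => ctc.insert (pvKey row) (v + 1))
      PySem.Dict.empty
    = PySem.Dict.counter (js_list.map pvKey) := by
  have h := PySem.List.foldl_pyRange_pyGetD js_list []
      (fun (ctc : PySem.Dict (String × String) Int) row =>
        match ctc.get? (pvKey row) with
        | none => ctc.insert (pvKey row) 1
        | some v => ctc.insert (pvKey row) (v + 1))
      PySem.Dict.empty (a := 0) le_rfl
  simp only [Int.toNat_zero, List.drop_zero] at h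
  rw [h]
  calc js_list.foldl (fun (ctc : PySem.Dict (String × String) Int) row =>
          match ctc.get? (pvKey row) with
          | none => ctc.insert (pvKey row) 1
          | some v => ctc.insert (pvKey row) (v + 1)) PySem.Dict.empty
      = js_list.foldl (fun d row => d.insert (pvKey row) (d.getD (pvKey row) 0 + 1))
          PySem.Dict.empty :=
        PySem.List.foldl_congr_mem _ _ _ _ (fun d row _ => pvStep_eq d (pvKey row))
    _ = (js_list.map pvKey).foldl (fun d x => d.insert x (d.getD x 0 + 1))
          PySem.Dict.empty := by rw [List.foldl_map]
    _ = PySem.Dict.counter (js_list.map pvKey) :=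
          PySem.Dict.foldl_insert_getD_add_one_eq_counter _

-- sum of a Counter's values = length of the counted list
theorem pvSum_counter (ks : List (String × String)) :
    ((PySem.Set.ofList ks).map (fun k => (List.count k ks : Int))).sum = (ks.length : Int) := by
  have hperm : (PySem.Set.ofList ks).Perm ks.dedup := by
    rw [List.perm_ext_iff_of_nodup (PySem.Set.nodup_ofList ks) ks.nodup_dedup]
    intro a; rw [PySem.Set.mem_ofList, List.mem_dedup]
  rw [(hperm.map (fun k => (List.count k ks : Int))).sum_eq]
  have hcast : ((ks.dedup.map (fun k => (List.count k ks : Int))).sum)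
      = ((ks.dedup.map (fun k => List.count k ks)).sum : Nat) := by
    push_cast; rw [List.map_map]; rfl
  rw [hcast]
  have hinst : (instBEqProd : BEq (String × String)) = instBEqOfDecidableEq :=
    lawful_beq_subsingleton _ _
  rw [show (fun k => @List.count (String × String) instBEqProd k ks)
        = (fun k => @List.count (String × String) instBEqOfDecidableEq k ks) by rw [hinst]]
  exact_mod_cast congrArg (Nat.cast : Nat → Int) (List.sum_map_count_dedup_eq_length ks)

-- number of distinct elements: |set(ks)| = |toFinset ks|
theorem pvSetLen_eq (ks : List (String × String)) :
    ((PySem.Set.ofList ks).length : Int) = (ks.toFinset.card : Int) := by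
  have h : (PySem.Set.ofList ks).toFinset = ks.toFinset := by
    ext x; simp [List.mem_toFinset, PySem.Set.mem_ofList]
  rw [← h, List.toFinset_card_of_nodup (PySem.Set.nodup_ofList ks)]

-- ===== VERDICT (by name: the statement is the Claim_ definition above) =====
theorem cal_connection_spec : Claim_equal_cal_connection := by
  intro js_list _ _
  unfold Spec_cal_connection cal_connection cal_connection_alt
  rw [pvCtc_eq]
  show (((PySem.Dict.counter (js_list.map pvKey)).size : Int),
        (PySem.Dict.counter (js_list.map pvKey)).items.foldl (fun g kv => g + kv.2) 0)
      = (((PySem.List.sorted (js_list.map pvKey) pvLexKey false).foldl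
            (fun (st : Int × Option (String × String)) k =>
              (if some k ≠ st.2 then st.1 + 1 else st.1, some k)) (0, none)).1,
         (PySem.List.len js_list : Int))
  rw [pvAlt_fst (js_list.map pvKey), Prod.mk.injEq]
  refine ⟨?_, ?_⟩
  · -- counts of distinct pairs agree
    rw [← pvSetLen_eq]
    simp only [PySem.Dict.size, PySem.Dict.items_counter, List.length_map]
  · -- total connections: sum of counter values = length of js_list
    rw [PySem.List.foldl_add ((PySem.Dict.counter (js_list.map pvKey)).items)
          (fun kv : (String × String) × Int => kv.2) 0]
    have hs := pvSum_counter (js_list.map pvKey)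
    simp only [List.length_map] at hs
    simp only [PySem.Dict.items_counter, List.map_map, zero_add, PySem.List.len]
    rw [show ((fun kv : (String × String) × Int => kv.2) ∘
          fun k => (k, (List.count k (js_list.map pvKey) : Int)))
        = fun k => (List.count k (js_list.map pvKey) : Int) from rfl]
    exact hs
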